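-- pv_equiv track=rewrite | github.com/BeomSeokYu/Algorithm | Programmers/Basic/다음에_올_숫자.py | solution
-- ===== SOURCE A (Python) =====
-- def solution(common):
--     answer = 0
--     case1 = common[1] - common[0]
--     case2 = common[2] - common[1]
--     if case1 == case2:
--         # 등차
--         answer = common[0] + (case1 * len(common))
--     else:
--         # 등비
--         r = common[1] // common[0]
--         answer = common[0]
--         for i in range(len(common)):
--             answer *= r
--     return answer
-- ===== SOURCE B (Python) =====
-- def _ipow(base, e):
--     # exponentiation by squaring, recursive
--     if e == 0:
--         return 1
--     half = _ipow(base, e // 2)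
--     return half * half * (base if e % 2 else 1)
--
-- def solution(common):
--     a, b, c = common[0], common[1], common[2]
--     n = len(common)
--     d = b - a
--     if c - b == d:
--         return a + d * n
--     return a * _ipow(b // a, n)
-- ===== Notes on version B (the rewrite author's own statement) =====
-- stated objective: alternative
-- what changed: B destructures the first three elements instead of repeated indexing and replaces the geometric branch's O(n) multiplication loop with a recursive exponentiation-by-squaring helper computing common[0] * (common[1]//common[0])**len(common).
import Mathlib
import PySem

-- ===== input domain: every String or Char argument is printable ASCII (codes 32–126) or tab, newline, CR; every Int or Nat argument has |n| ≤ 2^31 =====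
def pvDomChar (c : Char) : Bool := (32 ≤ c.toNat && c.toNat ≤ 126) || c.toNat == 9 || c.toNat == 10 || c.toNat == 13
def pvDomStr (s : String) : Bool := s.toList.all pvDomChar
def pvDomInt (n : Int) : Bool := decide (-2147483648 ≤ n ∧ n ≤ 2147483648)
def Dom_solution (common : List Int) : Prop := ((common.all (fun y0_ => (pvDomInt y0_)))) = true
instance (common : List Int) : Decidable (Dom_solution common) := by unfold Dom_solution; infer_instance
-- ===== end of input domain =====

-- B destructures the first three elements and computes the geometric branch by a recursive
-- exponentiation-by-squaring helper instead of A's multiplication loop (alternative algorithm).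

-- ===== PORT A =====
-- indexing via pyGet?; Pre_ guarantees the indices are in range, so the .getD 0 defaults are never used on admitted inputs
def solution (common : List Int) : Int :=
  let c0 := (PySem.List.pyGet? common 0).getD 0
  let c1 := (PySem.List.pyGet? common 1).getD 0
  let c2 := (PySem.List.pyGet? common 2).getD 0
  let case1 := c1 - c0
  let case2 := c2 - c1
  if case1 = case2 then
    c0 + case1 * (common.length : Int)
  else
    let r := PySem.Int.floordiv c1 c0
    (List.range common.length).foldl (fun answer _ => answer * r) c0

-- ===== PORT B =====
-- recursive exponentiation by squaring, as _ipow in Source B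
def ipow (base : Int) (e : Nat) : Int :=
  if e = 0 then 1
  else
    let half := ipow base (e / 2)
    half * half * (if e % 2 = 1 then base else 1)
decreasing_by omega

def solution_alt (common : List Int) : Int :=
  match common with
  | a :: b :: c :: rest =>
      let n := (a :: b :: c :: rest).length
      let d := b - a
      if c - b = d then a + d * (n : Int)
      else a * ipow (PySem.Int.floordiv b a) n
  | _ => 0   -- unreachable under Pre_ (Python raises IndexError on unpacking)

-- ===== PRECONDITION & SPEC =====
-- Pre_ excludes exactly the inputs where A raises: lists shorter than 3 (IndexError) and
-- geometric-branch lists whose first element is 0 (ZeroDivisionError).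
def Pre_solution (common : List Int) : Prop :=
  3 ≤ common.length ∧
  ((PySem.List.pyGet? common 1).getD 0 - (PySem.List.pyGet? common 0).getD 0 =
     (PySem.List.pyGet? common 2).getD 0 - (PySem.List.pyGet? common 1).getD 0 ∨
   (PySem.List.pyGet? common 0).getD 0 ≠ 0)
instance (common : List Int) : Decidable (Pre_solution common) := by unfold Pre_solution; infer_instance
def pvWitness_solution : List Int := [2, 6, 18]

def Spec_solution (common : List Int) (out : Int) : Prop := out = solution_alt common
instance (common : List Int) (out : Int) : Decidable (Spec_solution common out) := by unfold Spec_solution; infer_instance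

-- ===== CLAIM (what is proved, stated in full; the proofs are below) =====
def Claim_equal_solution : Prop := ∀ (common : List Int), Dom_solution common → Pre_solution common → Spec_solution common (solution common)

-- ===== LEMMAS AND PROOFS =====
theorem ipow_eq_pow (b : Int) (e : Nat) : ipow b e = b ^ e := by
  induction e using Nat.strong_induction_on with
  | _ e ih =>
    rw [ipow]
    by_cases h : e = 0
    · simp [h]
    · have hh := ih (e / 2) (by omega)
      simp only [if_neg h, hh]
      by_cases hp : e % 2 = 1
      · have : e / 2 + e / 2 + 1 = e := by omega
        rw [if_pos hp, ← pow_add, ← pow_succ, this]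
      · have : e / 2 + e / 2 = e := by omega
        rw [if_neg hp, mul_one, ← pow_add, this]

theorem foldl_mul_pow (r a : Int) (n : Nat) :
    (List.range n).foldl (fun answer _ => answer * r) a = a * r ^ n := by
  induction n generalizing a with
  | zero => simp
  | succ n ih =>
    rw [List.range_succ, List.foldl_append]
    simp [ih, pow_succ, mul_assoc]

-- ===== VERDICT (by name: the statement is the Claim_ definition above) =====
theorem solution_spec : Claim_equal_solution := by
  intro common _ hpre
  rcases common with _ | ⟨a, _ | ⟨b, _ | ⟨c, rest⟩⟩⟩
  · exact absurd hpre.1 (by simp)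
  · exact absurd hpre.1 (by simp)
  · exact absurd hpre.1 (by simp)
  unfold Spec_solution solution solution_alt
  have h0 : PySem.List.pyGet? (a :: b :: c :: rest) 0 = some a := by
    simp only [PySem.List.pyGet?, PySem.List.pyIdx?, List.length_cons]
    split_ifs with h <;> first | rfl | omega
  have h1 : PySem.List.pyGet? (a :: b :: c :: rest) 1 = some b := by
    simp only [PySem.List.pyGet?, PySem.List.pyIdx?, List.length_cons]
    split_ifs with h <;> first | rfl | omega
  have h2 : PySem.List.pyGet? (a :: b :: c :: rest) 2 = some c := by
    simp only [PySem.List.pyGet?, PySem.List.pyIdx?, List.length_cons]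
    split_ifs with h <;> first | rfl | omega
  simp only [h0, h1, h2, Option.getD_some, foldl_mul_pow, ipow_eq_pow, List.length_cons]
  by_cases h : b - a = c - b
  · rw [if_pos h, if_pos h.symm]
  · rw [if_neg h, if_neg (fun hc => h hc.symm)]
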